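-- pv_equiv track=rewrite | github.com/YWolfeee/Chinese_word-Segmentation | 代码 模型 数据 结果/code/train.py | change_mode
-- ===== SOURCE A (Python) =====
-- def change_mode(sentence):
--     seg = sentence.split()
--     leng = 0
--     for word in seg:
--         leng += len(word)
--     lis = []
--     lab = []
--     for word in seg:
--         label = []
--         if len(word) == 1:
--             label = "s"
--         else:
--             label = "b" + "m" * (len(word) - 2) + "e"
--         lis.append(word)
--         lab.append(label)
--     lis = u''.join(lis)
--     lab = u''.join(lab)
--     return list(lis), list(lab)
-- ===== SOURCE B (Python) =====
-- def change_mode(sentence):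
--     chars = []
--     labels = []
--     for word in sentence.split():
--         n = len(word)
--         for i, ch in enumerate(word):
--             chars.append(ch)
--             if n == 1:
--                 labels.append('s')
--             elif i == 0:
--                 labels.append('b')
--             elif i == n - 1:
--                 labels.append('e')
--             else:
--                 labels.append('m')
--     return chars, labels
-- ===== Notes on version B (the rewrite author's own statement) =====
-- stated objective: simpler
-- what changed: Replaces the three-phase pipeline (closed-form per-word label string, join into two big strings, re-split with list()) by a single pass that appends each character and its positional BMES label directly to the two result lists.
import Mathlib
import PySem

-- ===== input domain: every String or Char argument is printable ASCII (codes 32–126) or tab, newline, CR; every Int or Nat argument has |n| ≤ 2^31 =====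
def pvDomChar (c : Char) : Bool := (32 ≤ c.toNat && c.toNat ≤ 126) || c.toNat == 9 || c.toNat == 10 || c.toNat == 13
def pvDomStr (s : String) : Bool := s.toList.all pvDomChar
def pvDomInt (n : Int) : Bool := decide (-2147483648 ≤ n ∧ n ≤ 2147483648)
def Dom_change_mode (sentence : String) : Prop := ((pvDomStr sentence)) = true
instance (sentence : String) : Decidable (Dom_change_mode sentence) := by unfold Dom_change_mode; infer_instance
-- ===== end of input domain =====

-- B replaces A's pipeline (per-word closed-form label string 'b'+'m'*(n-2)+'e', join, list())
-- by a single pass emitting each character with its positional BMES label (objective: simpler).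

-- ===== PORT A =====
def change_mode (sentence : String) : List String × List String :=
  let seg := PySem.Str.split₀ sentence
  let _leng := seg.foldl (fun a w => a + PySem.Str.len w) 0
  let p := seg.foldl (fun (p : List String × List String) word =>
      let label : String :=
        if PySem.Str.len word = 1 then "s"
        else String.ofList ('b' :: (List.replicate (word.toList.length - 2) 'm' ++ ['e']))
      (p.1 ++ [word], p.2 ++ [label])) ([], [])
  let lis := PySem.Str.join "" p.1
  let lab := PySem.Str.join "" p.2
  (lis.toList.map (fun c => String.ofList [c]), lab.toList.map (fun c => String.ofList [c]))

-- ===== PORT B =====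
def bmesLabel (n i : Int) : String :=
  if n = 1 then "s" else if i = 0 then "b" else if i = n - 1 then "e" else "m"

def change_mode_alt (sentence : String) : List String × List String :=
  (PySem.Str.split₀ sentence).foldl (fun acc word =>
    let n : Int := PySem.Str.len word
    (PySem.List.enumerate word.toList).foldl (fun (acc : List String × List String) ic =>
      (acc.1 ++ [String.ofList [ic.2]], acc.2 ++ [bmesLabel n ic.1])) acc) ([], [])

-- ===== PRECONDITION & SPEC =====
def Spec_change_mode (sentence : String) (out : List String × List String) : Prop := out = change_mode_alt sentence
instance (sentence : String) (out : List String × List String) : Decidable (Spec_change_mode sentence out) := by unfold Spec_change_mode; infer_instance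

-- ===== CLAIM (what is proved, stated in full; the proofs are below) =====
def Claim_equal_change_mode : Prop := ∀ (sentence : String), Dom_change_mode sentence → Spec_change_mode sentence (change_mode sentence)

-- ===== LEMMAS AND PROOFS =====

-- A's per-word label, named for the proofs
def labelA (word : String) : String :=
  if PySem.Str.len word = 1 then "s"
  else String.ofList ('b' :: (List.replicate (word.toList.length - 2) 'm' ++ ['e']))

-- join with an empty separator is flatten
theorem join_nil_eq_flatten (parts : List (List Char)) :
    PySem.Chars.join [] parts = parts.flatten := by
  induction parts with
  | nil => simp [PySem.Chars.join_nil]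
  | cons p ps ih =>
    cases ps with
    | nil => simp [PySem.Chars.join_singleton]
    | cons q qs => rw [PySem.Chars.join_cons_cons, ih]; simp

-- words produced by split() are nonempty
theorem split₀_go_ne_nil (s : List Char) : ∀ (cur : List Char) (acc : List (List Char)),
    (∀ w ∈ acc, w ≠ []) → ∀ w ∈ PySem.Chars.split₀.go s cur acc, w ≠ [] := by
  induction s with
  | nil =>
    intro cur acc hacc w hw
    by_cases hc : cur.isEmpty
    · simp [PySem.Chars.split₀.go, hc] at hw; exact hacc w hw
    · simp [PySem.Chars.split₀.go, hc] at hw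
      rcases hw with hw | hw
      · exact hacc w hw
      · subst hw; simp; intro h; subst h; simp at hc
  | cons c rest ih =>
    intro cur acc hacc w hw
    by_cases hsp : PySem.Chars.isspace c
    · by_cases hc : cur.isEmpty
      · simp only [PySem.Chars.split₀.go, hsp, hc, if_true] at hw
        exact ih [] acc hacc w hw
      · simp only [PySem.Chars.split₀.go, hsp, hc, if_true] at hw
        refine ih [] (cur.reverse :: acc) ?_ w hw
        intro u hu
        rcases List.mem_cons.mp hu with hu | hu
        · subst hu; intro h; simp at h; subst h; simp at hc
        · exact hacc u hu
    · simp only [PySem.Chars.split₀.go, hsp] at hw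
      exact ih (c :: cur) acc hacc w hw

theorem split₀_ne_nil (s : String) : ∀ w ∈ PySem.Str.split₀ s, w.toList ≠ [] := by
  intro w hw
  simp only [PySem.Str.split₀, List.mem_map] at hw
  obtain ⟨u, hu, rfl⟩ := hw
  rw [String.toList_ofList]
  exact split₀_go_ne_nil s.toList [] [] (by simp) u hu

-- A's accumulator loop, characterised
theorem foldA (seg : List String) (acc : List String × List String) :
    seg.foldl (fun (p : List String × List String) word =>
      (p.1 ++ [word], p.2 ++ [if PySem.Str.len word = 1 then "s"
        else String.ofList ('b' :: (List.replicate (word.toList.length - 2) 'm' ++ ['e']))])) acc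
    = (acc.1 ++ seg, acc.2 ++ seg.map labelA) := by
  induction seg generalizing acc with
  | nil => simp
  | cons w ws ih => rw [List.foldl_cons, ih]; simp [labelA]

-- B's inner (per-character) loop, characterised
theorem foldB_inner (n : Int) (cs : List Char) : ∀ (s : Int) (acc : List String × List String),
    (PySem.List.enumerate cs s).foldl (fun (acc : List String × List String) ic =>
      (acc.1 ++ [String.ofList [ic.2]], acc.2 ++ [bmesLabel n ic.1])) acc
    = (acc.1 ++ cs.map (fun c => String.ofList [c]),
       acc.2 ++ (PySem.List.enumerate cs s).map (fun ic => bmesLabel n ic.1)) := by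
  induction cs with
  | nil => intro s acc; simp [PySem.List.enumerate_nil]
  | cons c cs ih => intro s acc; simp [PySem.List.enumerate_cons, ih]

-- B's outer loop, characterised
theorem foldB (seg : List String) (acc : List String × List String) :
    seg.foldl (fun (acc : List String × List String) word =>
      (PySem.List.enumerate word.toList).foldl (fun (acc : List String × List String) ic =>
        (acc.1 ++ [String.ofList [ic.2]], acc.2 ++ [bmesLabel (PySem.Str.len word) ic.1])) acc) acc
    = (acc.1 ++ (seg.map (fun w => w.toList.map (fun c => String.ofList [c]))).flatten,
       acc.2 ++ (seg.map (fun w => (PySem.List.enumerate w.toList 0).map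
          (fun ic => bmesLabel (PySem.Str.len w) ic.1))).flatten) := by
  induction seg generalizing acc with
  | nil => simp
  | cons w ws ih => rw [List.foldl_cons, foldB_inner, ih]; simp

-- the key per-word fact: A's label string, split into characters, is B's positional labels
theorem label_key (w : String) (h : w.toList ≠ []) :
    (labelA w).toList.map (fun c => String.ofList [c])
    = (PySem.List.enumerate w.toList 0).map (fun ic => bmesLabel (PySem.Str.len w) ic.1) := by
  have hn : 1 ≤ w.toList.length := List.length_pos_iff.mpr h
  apply List.ext_getElem
  · simp only [labelA, PySem.Str.len_eq]
    split_ifs with h1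
    · have he : w.toList.length = 1 := by exact_mod_cast h1
      simp [he, PySem.List.length_enumerate]
    · have h2 : 2 ≤ w.toList.length := by
        by_contra hc
        exact h1 (by have : w.toList.length = 1 := by omega
                     exact_mod_cast this)
      simp only [List.length_map, String.toList_ofList, List.length_cons,
        List.length_append, List.length_replicate, List.length_nil, PySem.List.length_enumerate]
      omega
  · intro i h₁ h₂
    simp only [List.getElem_map, PySem.List.getElem_enumerate]
    have hi : i < w.toList.length := by
      simpa [PySem.List.length_enumerate] using h₂
    rw [PySem.Str.len_eq]
    simp only [labelA, PySem.Str.len_eq]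
    by_cases h1 : (w.toList.length : Int) = 1
    · have hn1 : w.toList.length = 1 := by exact_mod_cast h1
      have hi0 : i = 0 := by omega
      simp [hn1, hi0, bmesLabel]
    · have h2 : 2 ≤ w.toList.length := by
        by_contra hc
        exact h1 (by have : w.toList.length = 1 := by omega
                     exact_mod_cast this)
      simp only [h1, if_false, String.toList_ofList]
      rcases Nat.eq_zero_or_pos i with hi0 | hip
      · subst hi0
        simp only [List.getElem_cons_zero, bmesLabel, h1, if_false]
        simp
      · have hbm : ∀ (hh : i < ('b' :: (List.replicate (w.toList.length - 2) 'm' ++ ['e'])).length),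
            ('b' :: (List.replicate (w.toList.length - 2) 'm' ++ ['e']))[i]'hh =
            (List.replicate (w.toList.length - 2) 'm' ++ ['e'])[i - 1]'(by
              simp only [List.length_cons, List.length_append, List.length_replicate] at hh ⊢
              omega) := by
          intro hh
          rcases Nat.exists_eq_add_of_lt hip with ⟨j, hj⟩
          rcases i with _ | i
          · omega
          · simp
        rw [hbm]
        by_cases hie : i = w.toList.length - 1
        · rw [List.getElem_append_right (by simp only [List.length_replicate]; omega)]
          have hbl : bmesLabel (w.toList.length : Int) ((0 : Int) + i) = "e" := by
            simp only [bmesLabel, h1, if_false]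
            rw [if_neg (by omega), if_pos (by omega)]
          rw [hbl]
          simp only [List.length_replicate, List.getElem_singleton]
        · have him : i - 1 < w.toList.length - 2 := by omega
          rw [List.getElem_append_left (by simpa using him)]
          simp only [List.getElem_replicate]
          have hbl : bmesLabel (w.toList.length : Int) ((0 : Int) + i) = "m" := by
            simp only [bmesLabel, h1, if_false]
            rw [if_neg (by omega), if_neg (by omega)]
          rw [hbl]

-- ===== VERDICT (by name: the statement is the Claim_ definition above) =====
theorem change_mode_spec : Claim_equal_change_mode := by
  intro sentence _
  show change_mode sentence = change_mode_alt sentence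
  simp only [change_mode, change_mode_alt]
  rw [foldA, foldB]
  simp only [List.nil_append]
  rw [PySem.Str.toList_join, PySem.Str.toList_join]
  simp only [String.toList_empty, join_nil_eq_flatten, List.map_flatten, List.map_map]
  refine Prod.ext rfl ?_
  simp only [Function.comp_def]
  congr 1
  apply List.map_congr_left
  intro w hw
  exact label_key w (split₀_ne_nil sentence w hw)
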